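-- pv_equiv track=rewrite | github.com/s3team/phoenix | a2c/src/util.py | split_basicblock
-- ===== SOURCE A (Python) =====
-- def split_basicblock(program):
--     '''
--         input: asm program in string
--         output: {"label_name":["inst1", "inst2"]}
--     '''
--     bbs = dict()
--     cur_bb = list()
--     cur_label = str()
--
--     for line in program.split("\n"):
--         if(line == "" or line.startswith(".")):
--             continue
--         if(line.endswith(":")):
--             if(len(cur_bb) > 0):
--                 bbs[cur_label[:-1]] = cur_bb
--                 cur_bb = list()
--             cur_label = line
--         else:
--             cur_bb.append(line)
--
--     if(len(cur_bb) > 0):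
--         bbs[cur_label[:-1]] = cur_bb
--
--     return bbs
-- ===== SOURCE B (Python) =====
-- def split_basicblock(program):
--     # back-to-front pass: collect each label's block by scanning reversed lines, then build the dict forward
--     lines = [l for l in program.split("\n") if l != "" and not l.startswith(".")]
--     pairs = []
--     block = []
--     for line in reversed(lines):
--         if line.endswith(":"):
--             if block:
--                 pairs.append((line[:-1], block))
--                 block = []
--         else:
--             block = [line] + block
--     if block:
--         pairs.append(("", block))
--     bbs = {}
--     for k, v in reversed(pairs):
--         bbs[k] = v
--     return bbs
-- ===== Notes on version B (the rewrite author's own statement) =====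
-- stated objective: alternative
-- what changed: A streams lines forward, accumulating a pending block and label and inserting into the dict as it goes; B first filters the kept lines, scans them back-to-front collecting (label, block) pairs (prepending instructions until a label is hit), flushes leading instructions under the empty label, and only then builds the dict in one forward pass over the reversed pair list.
import Mathlib
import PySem

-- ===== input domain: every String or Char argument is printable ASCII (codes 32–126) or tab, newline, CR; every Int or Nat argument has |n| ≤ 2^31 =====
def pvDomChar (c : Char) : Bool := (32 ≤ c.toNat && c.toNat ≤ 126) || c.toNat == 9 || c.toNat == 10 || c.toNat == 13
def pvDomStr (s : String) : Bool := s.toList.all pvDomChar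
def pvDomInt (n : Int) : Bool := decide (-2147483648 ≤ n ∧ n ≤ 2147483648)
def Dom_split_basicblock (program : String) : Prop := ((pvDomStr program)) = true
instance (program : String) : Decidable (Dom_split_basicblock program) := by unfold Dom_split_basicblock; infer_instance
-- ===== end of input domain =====

-- B replaces A's streaming dict accumulator by a back-to-front pass collecting (label, block) pairs, then one forward dict build (objective: alternative decomposition).

-- ===== PORT A =====
-- A's loop body: state is (bbs, cur_bb, cur_label)
def pvStepA (s : PySem.Dict String (List String) × List String × String) (line : String) :
    PySem.Dict String (List String) × List String × String :=
  if line = "" || PySem.Str.startswith line "." then s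
  else if PySem.Str.endswith line ":" then
    (if s.2.1.length > 0 then
      (s.1.insert (PySem.Str.slice s.2.2 none (some (-1))) s.2.1, [], line)
     else (s.1, s.2.1, line))
  else (s.1, s.2.1 ++ [line], s.2.2)

-- A's final flush of the pending block
def pvFlushA (s : PySem.Dict String (List String) × List String × String) :
    PySem.Dict String (List String) :=
  if s.2.1.length > 0 then
    s.1.insert (PySem.Str.slice s.2.2 none (some (-1))) s.2.1
  else s.1

def split_basicblock (program : String) : List (String × List String) :=
  let lines := (PySem.Str.split? program "\n").getD []
  (pvFlushA (lines.foldl pvStepA (PySem.Dict.empty, [], ""))).items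

-- ===== PORT B =====
-- B's reverse-scan loop body: state is (pairs, block)
def pvStepB (s : List (String × List String) × List String) (line : String) :
    List (String × List String) × List String :=
  if PySem.Str.endswith line ":" then
    (if s.2 ≠ [] then (s.1 ++ [(PySem.Str.slice line none (some (-1)), s.2)], []) else s)
  else (s.1, line :: s.2)

-- B's dict-building loop body
def pvIns (d : PySem.Dict String (List String)) (p : String × List String) :
    PySem.Dict String (List String) :=
  d.insert p.1 p.2

def split_basicblock_alt (program : String) : List (String × List String) :=
  let lines := ((PySem.Str.split? program "\n").getD []).filter
      (fun l => !(l = "" || PySem.Str.startswith l "."))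
  let st := lines.reverse.foldl pvStepB ([], [])
  let pairs := if st.2 ≠ [] then st.1 ++ [("", st.2)] else st.1
  (pairs.reverse.foldl pvIns PySem.Dict.empty).items

-- ===== PRECONDITION & SPEC =====
def Spec_split_basicblock (program : String) (out : List (String × List String)) : Prop := out = split_basicblock_alt program
instance (program : String) (out : List (String × List String)) : Decidable (Spec_split_basicblock program out) := by unfold Spec_split_basicblock; infer_instance

-- ===== CLAIM (what is proved, stated in full; the proofs are below) =====
def Claim_equal_split_basicblock : Prop := ∀ (program : String), Dom_split_basicblock program → Spec_split_basicblock program (split_basicblock program)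

-- ===== LEMMAS AND PROOFS =====

-- line classification shared by both programs
def pvSkip (l : String) : Bool := l = "" || PySem.Str.startswith l "."
def pvLab (l : String) : Bool := PySem.Str.endswith l ":"
def pvStrip (l : String) : String := PySem.Str.slice l none (some (-1))

-- case equations for A's step
theorem pvStepA_skip (s : PySem.Dict String (List String) × List String × String) (l : String)
    (h : pvSkip l = true) : pvStepA s l = s := by
  simp only [pvSkip] at h; simp only [pvStepA, h]; simp

theorem pvStepA_lab_pos (s : PySem.Dict String (List String) × List String × String) (l : String)
    (h1 : pvSkip l = false) (h2 : pvLab l = true) (h3 : s.2.1 ≠ []) :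
    pvStepA s l = (s.1.insert (pvStrip s.2.2) s.2.1, [], l) := by
  simp only [pvSkip] at h1; simp only [pvLab] at h2
  have hlen : s.2.1.length > 0 := List.length_pos_iff.mpr h3
  simp only [pvStepA, h1, h2]; simp [hlen, pvStrip]

theorem pvStepA_lab_nil (s : PySem.Dict String (List String) × List String × String) (l : String)
    (h1 : pvSkip l = false) (h2 : pvLab l = true) (h3 : s.2.1 = []) :
    pvStepA s l = (s.1, s.2.1, l) := by
  simp only [pvSkip] at h1; simp only [pvLab] at h2
  simp only [pvStepA, h1, h2]; simp [h3]

theorem pvStepA_inst (s : PySem.Dict String (List String) × List String × String) (l : String)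
    (h1 : pvSkip l = false) (h2 : pvLab l = false) :
    pvStepA s l = (s.1, s.2.1 ++ [l], s.2.2) := by
  simp only [pvSkip] at h1; simp only [pvLab] at h2
  simp only [pvStepA, h1, h2]; simp

-- case equations for B's step
theorem pvStepB_lab_pos (s : List (String × List String) × List String) (l : String)
    (h2 : pvLab l = true) (h3 : s.2 ≠ []) :
    pvStepB s l = (s.1 ++ [(pvStrip l, s.2)], []) := by
  simp only [pvLab] at h2; simp only [pvStepB, h2]; simp [h3, pvStrip]

theorem pvStepB_lab_nil (s : List (String × List String) × List String) (l : String)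
    (h2 : pvLab l = true) (h3 : s.2 = []) : pvStepB s l = s := by
  simp only [pvLab] at h2; simp only [pvStepB, h2]; simp [h3]

theorem pvStepB_inst (s : List (String × List String) × List String) (l : String)
    (h2 : pvLab l = false) : pvStepB s l = (s.1, l :: s.2) := by
  simp only [pvLab] at h2; simp only [pvStepB, h2]; simp

-- the instruction lines before the first label
def pvLead : List String → List String
  | [] => []
  | l :: r => if pvSkip l then pvLead r else if pvLab l then [] else l :: pvLead r

-- the (stripped label, following block) pairs, empty blocks dropped
def pvLabeled : List String → List (String × List String)
  | [] => []
  | l :: r => if pvSkip l then pvLabeled r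
      else if pvLab l then (if pvLead r ≠ [] then (pvStrip l, pvLead r) :: pvLabeled r else pvLabeled r)
      else pvLabeled r

-- A's pending-state reading: pairs emitted from pending label lab / pending block bb over the rest
def pvPairsFrom (lab : String) (bb : List String) : List String → List (String × List String)
  | [] => if bb ≠ [] then [(pvStrip lab, bb)] else []
  | l :: r => if pvSkip l then pvPairsFrom lab bb r
      else if pvLab l then
        (if bb ≠ [] then (pvStrip lab, bb) :: pvPairsFrom l [] r else pvPairsFrom l [] r)
      else pvPairsFrom lab (bb ++ [l]) r

-- A's loop, flushed, inserts exactly pvPairsFrom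
theorem pvA_fold (L : List String) : ∀ (d : PySem.Dict String (List String)) (bb : List String) (lab : String),
    pvFlushA (L.foldl pvStepA (d, bb, lab)) = List.foldl pvIns d (pvPairsFrom lab bb L) := by
  induction L with
  | nil =>
    intro d bb lab
    simp only [List.foldl, pvPairsFrom, pvFlushA]
    by_cases h : bb = []
    · simp [h]
    · have : bb.length > 0 := List.length_pos_iff.mpr h
      simp [h, this, pvIns, pvStrip]
  | cons l r ih =>
    intro d bb lab
    simp only [List.foldl, pvPairsFrom]
    by_cases hs : pvSkip l = true
    · rw [pvStepA_skip _ _ hs]; simp [hs, ih]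
    · simp only [Bool.not_eq_true] at hs
      simp only [hs, Bool.false_eq_true, if_false]
      by_cases hl : pvLab l = true
      · by_cases hb : bb = []
        · rw [pvStepA_lab_nil _ _ hs hl hb]; simp [hl, hb, ih]
        · rw [pvStepA_lab_pos _ _ hs hl hb]
          simp [hl, hb, ih, pvIns]
      · simp only [Bool.not_eq_true] at hl
        rw [pvStepA_inst _ _ hs hl]
        simp [hl, ih]

-- pvPairsFrom in terms of pvLead / pvLabeled
theorem pvPairsFrom_char (L : List String) : ∀ (lab : String) (bb : List String),
    pvPairsFrom lab bb L
      = (if bb ++ pvLead L ≠ [] then [(pvStrip lab, bb ++ pvLead L)] else []) ++ pvLabeled L := by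
  induction L with
  | nil => intro lab bb; simp [pvPairsFrom, pvLead, pvLabeled]
  | cons l r ih =>
    intro lab bb
    simp only [pvPairsFrom, pvLead, pvLabeled]
    by_cases hs : pvSkip l = true
    · simp [hs, ih]
    · simp only [Bool.not_eq_true] at hs
      simp only [hs, Bool.false_eq_true, if_false]
      by_cases hl : pvLab l = true
      · by_cases hb : bb = [] <;> by_cases hld : pvLead r = [] <;> simp [hl, hb, hld, ih l []]
      · simp only [Bool.not_eq_true] at hl
        simp only [hl, Bool.false_eq_true, if_false, ih lab (bb ++ [l])]
        simp

-- pvLead / pvLabeled ignore skipped lines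
theorem pvLead_filter (L : List String) : pvLead (L.filter (fun l => !pvSkip l)) = pvLead L := by
  induction L with
  | nil => rfl
  | cons l r ih =>
    by_cases hs : pvSkip l = true
    · simp [List.filter, hs, pvLead, ih]
    · simp only [Bool.not_eq_true] at hs
      simp [List.filter, hs, pvLead, ih]

theorem pvLabeled_filter (L : List String) : pvLabeled (L.filter (fun l => !pvSkip l)) = pvLabeled L := by
  induction L with
  | nil => rfl
  | cons l r ih =>
    by_cases hs : pvSkip l = true
    · simp [List.filter, hs, pvLabeled, ih]
    · simp only [Bool.not_eq_true] at hs
      simp [List.filter, hs, pvLabeled, ih, pvLead_filter]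

-- B's reverse loop computes (pvLabeled L).reverse and pvLead L on a skip-free list
theorem pvB_fold (L : List String) (h : ∀ l ∈ L, pvSkip l = false) :
    L.reverse.foldl pvStepB ([], []) = ((pvLabeled L).reverse, pvLead L) := by
  rw [List.foldl_reverse]
  induction L with
  | nil => rfl
  | cons l r ih =>
    have hl : pvSkip l = false := h l (by simp)
    have hr : ∀ x ∈ r, pvSkip x = false := fun x hx => h x (by simp [hx])
    simp only [List.foldr_cons, ih hr]
    simp only [pvLabeled, pvLead, hl, Bool.false_eq_true, if_false]
    by_cases hlab : pvLab l = true
    · by_cases hld : pvLead r = []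
      · rw [pvStepB_lab_nil _ _ hlab hld]; simp [hlab, hld]
      · rw [pvStepB_lab_pos _ _ hlab hld]; simp [hlab, hld]
    · simp only [Bool.not_eq_true] at hlab
      rw [pvStepB_inst _ _ hlab]; simp [hlab]

theorem pvStrip_empty : pvStrip "" = "" := by decide

-- ===== VERDICT (by name: the statement is the Claim_ definition above) =====
theorem split_basicblock_spec : Claim_equal_split_basicblock := by
  intro program _
  unfold Spec_split_basicblock split_basicblock split_basicblock_alt
  dsimp only []
  set L := (PySem.Str.split? program "\n").getD [] with hL
  rw [pvA_fold L PySem.Dict.empty [] "", pvPairsFrom_char L "" []]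
  have hfeq : (L.filter (fun l => !(l = "" || PySem.Str.startswith l "."))) = L.filter (fun l => !pvSkip l) := by
    simp [pvSkip]
  have hfl : ∀ l ∈ L.filter (fun l => !pvSkip l), pvSkip l = false := by
    intro l hl
    simpa using List.of_mem_filter hl
  rw [hfeq, pvB_fold _ hfl]
  simp only [pvLead_filter, pvLabeled_filter]
  by_cases hld : pvLead L = []
  · simp [hld]
  · simp [hld, pvStrip_empty, List.reverse_append]
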